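-- pv_equiv track=rewrite | github.com/Kensan196948G/ZeroTrust-ID-Governance | backend/engine/policy_engine.py | _check_sod
-- ===== SOURCE A (Python) =====
-- SOD_CONFLICT_PAIRS: list[tuple[str, str]] = [
--     ("Requester", "Approver"),          # 自己承認防止
--     ("Developer", "ProductionDeployer"), # 開発・本番デプロイ分離
--     ("FinanceUser", "FinanceAuditor"),   # 財務操作・監査分離
--     ("UserAdmin", "AuditAdmin"),         # ユーザ管理・監査管理分離
-- ]
--
-- def _check_sod(requested_role: str, current_roles: list[str]) -> list[str]:
--     """要求ロールと既存ロールの SoD 競合を返す"""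
--     conflicts: list[str] = []
--     for role_a, role_b in SOD_CONFLICT_PAIRS:
--         if requested_role == role_a and role_b in current_roles:
--             conflicts.append(f"{role_a} と {role_b} は同時付与不可")
--         elif requested_role == role_b and role_a in current_roles:
--             conflicts.append(f"{role_b} と {role_a} は同時付与不可")
--     return conflicts
-- ===== SOURCE B (Python) =====
-- SOD_CONFLICT_PAIRS: list[tuple[str, str]] = [
--     ("Requester", "Approver"),
--     ("Developer", "ProductionDeployer"),
--     ("FinanceUser", "FinanceAuditor"),
--     ("UserAdmin", "AuditAdmin"),
-- ]
--
-- _CONFLICT_SETS = {frozenset(pair) for pair in SOD_CONFLICT_PAIRS}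
--
--
-- def _check_sod(requested_role: str, current_roles: list[str]) -> list[str]:
--     """要求ロールと既存ロールの SoD 競合を返す"""
--     for held in current_roles:
--         if frozenset((requested_role, held)) in _CONFLICT_SETS:
--             return [f"{requested_role} と {held} は同時付与不可"]
--     return []
-- ===== Notes on version B (the rewrite author's own statement) =====
-- stated objective: alternative
-- what changed: Instead of scanning the fixed conflict-pair list with two symmetric branches, B scans the user's current_roles once and tests each held role against a set of unordered conflict pairs (frozensets), returning on the first conflicting held role; correct because the SoD roles are pairwise distinct, so at most one conflict message can ever arise.
import Mathlib
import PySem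

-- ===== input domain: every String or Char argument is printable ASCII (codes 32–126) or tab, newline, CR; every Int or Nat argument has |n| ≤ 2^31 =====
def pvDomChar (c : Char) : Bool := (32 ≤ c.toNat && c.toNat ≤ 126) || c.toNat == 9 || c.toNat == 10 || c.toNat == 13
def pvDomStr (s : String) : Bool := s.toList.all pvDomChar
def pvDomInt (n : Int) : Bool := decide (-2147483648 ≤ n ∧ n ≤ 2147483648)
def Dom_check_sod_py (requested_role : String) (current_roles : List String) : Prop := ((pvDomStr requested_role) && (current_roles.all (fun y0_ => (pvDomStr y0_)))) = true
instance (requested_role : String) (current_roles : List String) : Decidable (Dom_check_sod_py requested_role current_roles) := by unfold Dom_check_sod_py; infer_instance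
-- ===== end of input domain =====

-- ===== PORT A =====
-- B scans current_roles once against a set of unordered conflict pairs instead of scanning the pair list (alternative traversal; same results).
def sodConflictPairs : List (String × String) :=
  [("Requester", "Approver"),
   ("Developer", "ProductionDeployer"),
   ("FinanceUser", "FinanceAuditor"),
   ("UserAdmin", "AuditAdmin")]

def check_sod_py (requested_role : String) (current_roles : List String) : List String :=
  sodConflictPairs.foldl (fun conflicts ab =>
    if requested_role = ab.1 ∧ ab.2 ∈ current_roles then
      conflicts ++ [ab.1 ++ " と " ++ ab.2 ++ " は同時付与不可"]
    else if requested_role = ab.2 ∧ ab.1 ∈ current_roles then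
      conflicts ++ [ab.2 ++ " と " ++ ab.1 ++ " は同時付与不可"]
    else conflicts) []

-- ===== PORT B =====
-- membership of the unordered pair {a, b} in the conflict-pair set (frozenset test in Source B)
def sodConflict (a b : String) : Bool :=
  sodConflictPairs.any (fun p => (p.1 == a && p.2 == b) || (p.1 == b && p.2 == a))

def check_sod_py_alt (requested_role : String) (current_roles : List String) : List String :=
  match current_roles with
  | [] => []
  | held :: rest =>
      if sodConflict requested_role held then
        [requested_role ++ " と " ++ held ++ " は同時付与不可"]
      else check_sod_py_alt requested_role rest

-- ===== PRECONDITION & SPEC =====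
def Spec_check_sod_py (requested_role : String) (current_roles : List String) (out : List String) : Prop := out = check_sod_py_alt requested_role current_roles
instance (requested_role : String) (current_roles : List String) (out : List String) : Decidable (Spec_check_sod_py requested_role current_roles out) := by unfold Spec_check_sod_py; infer_instance

-- ===== CLAIM (what is proved, stated in full; the proofs are below) =====
def Claim_equal_check_sod_py : Prop := ∀ (requested_role : String) (current_roles : List String), Dom_check_sod_py requested_role current_roles → Spec_check_sod_py requested_role current_roles (check_sod_py requested_role current_roles)

-- ===== LEMMAS AND PROOFS =====

-- B's scan, when the only role conflicting with r is p, returns [msg] iff p is held.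
lemma alt_single (r p : String) (hconf : ∀ h, sodConflict r h = (p == h)) :
    ∀ cur : List String,
      check_sod_py_alt r cur =
        if p ∈ cur then [r ++ " と " ++ p ++ " は同時付与不可"] else [] := by
  intro cur
  induction cur with
  | nil => simp [check_sod_py_alt]
  | cons h t ih =>
      rw [check_sod_py_alt, hconf h]
      by_cases hp : p = h
      · subst hp; simp
      · simp [hp, ih]

-- B's scan returns [] when no role conflicts with r.
lemma alt_none (r : String) (hconf : ∀ h, sodConflict r h = false) :
    ∀ cur : List String, check_sod_py_alt r cur = [] := by
  intro cur
  induction cur with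
  | nil => rfl
  | cons h t ih => rw [check_sod_py_alt, hconf h]; simpa using ih

-- ===== VERDICT (by name: the statement is the Claim_ definition above) =====
theorem check_sod_py_spec : Claim_equal_check_sod_py := by
  intro r cur _
  unfold Spec_check_sod_py
  by_cases h1 : r = "Requester"
  · subst h1
    rw [alt_single _ "Approver" (by intro h; simp [sodConflict, sodConflictPairs])]
    simp [check_sod_py, sodConflictPairs, List.foldl]
  by_cases h2 : r = "Approver"
  · subst h2
    rw [alt_single _ "Requester" (by intro h; simp [sodConflict, sodConflictPairs])]
    simp [check_sod_py, sodConflictPairs, List.foldl]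
  by_cases h3 : r = "Developer"
  · subst h3
    rw [alt_single _ "ProductionDeployer" (by intro h; simp [sodConflict, sodConflictPairs])]
    simp [check_sod_py, sodConflictPairs, List.foldl]
  by_cases h4 : r = "ProductionDeployer"
  · subst h4
    rw [alt_single _ "Developer" (by intro h; simp [sodConflict, sodConflictPairs])]
    simp [check_sod_py, sodConflictPairs, List.foldl]
  by_cases h5 : r = "FinanceUser"
  · subst h5
    rw [alt_single _ "FinanceAuditor" (by intro h; simp [sodConflict, sodConflictPairs])]
    simp [check_sod_py, sodConflictPairs, List.foldl]
  by_cases h6 : r = "FinanceAuditor"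
  · subst h6
    rw [alt_single _ "FinanceUser" (by intro h; simp [sodConflict, sodConflictPairs])]
    simp [check_sod_py, sodConflictPairs, List.foldl]
  by_cases h7 : r = "UserAdmin"
  · subst h7
    rw [alt_single _ "AuditAdmin" (by intro h; simp [sodConflict, sodConflictPairs])]
    simp [check_sod_py, sodConflictPairs, List.foldl]
  by_cases h8 : r = "AuditAdmin"
  · subst h8
    rw [alt_single _ "UserAdmin" (by intro h; simp [sodConflict, sodConflictPairs])]
    simp [check_sod_py, sodConflictPairs, List.foldl]
  · rw [alt_none r (by intro h; simp [sodConflict, sodConflictPairs, Ne.symm h1, Ne.symm h2, Ne.symm h3, Ne.symm h4, Ne.symm h5, Ne.symm h6, Ne.symm h7, Ne.symm h8])]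
    simp [check_sod_py, sodConflictPairs, List.foldl, h1, h2, h3, h4, h5, h6, h7, h8]
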